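-- pv_equiv track=rewrite | github.com/Unn4m3DD/escolisca | aula1.py | menor_e_resto
-- ===== SOURCE A (Python) =====
-- def menor_e_resto(lista, minimum=None):
--   if lista == []:
--     return None, []
--   minimum = lista[0] if minimum == None else minimum
--   res_minimum, res_lista = menor_e_resto(lista[1:], minimum)
--   minimum = res_minimum if res_minimum != None and res_minimum < minimum else minimum
--   if(lista[0] > minimum):
--     return minimum, [lista[0]] + res_lista
--   elif(lista[0] == minimum):
--     return minimum, res_lista
--   else:
--     return lista[0], lista[1:]
-- ===== SOURCE B (Python) =====
-- def menor_e_resto(lista, minimum=None):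
--   if lista == []:
--     return None, []
--   m = min(lista) if minimum is None else min(minimum, min(lista))
--   return m, [x for x in lista if x != m]
-- ===== Notes on version B (the rewrite author's own statement) =====
-- stated objective: simpler
-- what changed: Replaces the accumulator-passing recursion over list slices by a direct two-pass version: compute the minimum (floored by the optional 'minimum' argument) with builtin min, then filter out its occurrences with one comprehension.
import Mathlib
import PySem

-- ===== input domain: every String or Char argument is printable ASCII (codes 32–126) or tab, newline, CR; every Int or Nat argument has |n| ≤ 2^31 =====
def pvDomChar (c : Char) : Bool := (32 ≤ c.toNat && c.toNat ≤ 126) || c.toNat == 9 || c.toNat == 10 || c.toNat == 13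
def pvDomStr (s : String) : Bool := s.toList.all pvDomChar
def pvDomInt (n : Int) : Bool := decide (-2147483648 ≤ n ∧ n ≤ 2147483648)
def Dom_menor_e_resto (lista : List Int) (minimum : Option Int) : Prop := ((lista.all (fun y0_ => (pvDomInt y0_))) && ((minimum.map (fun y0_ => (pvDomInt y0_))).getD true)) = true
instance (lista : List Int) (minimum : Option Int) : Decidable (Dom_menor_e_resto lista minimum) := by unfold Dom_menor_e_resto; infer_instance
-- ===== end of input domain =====

-- ===== PORT A =====
def menor_e_resto (lista : List Int) (minimum : Option Int) : Option Int × List Int :=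
  match lista with
  | [] => (none, [])
  | h :: t =>
    let minimum := match minimum with
      | none => h
      | some m => m
    let r := menor_e_resto t (some minimum)
    let res_minimum := r.1
    let res_lista := r.2
    let minimum := match res_minimum with
      | some rm => if rm < minimum then rm else minimum
      | none => minimum
    if h > minimum then (some minimum, h :: res_lista)
    else if h = minimum then (some minimum, res_lista)
    else (some h, t)

-- ===== PORT B =====
-- B: compute the (floored) minimum with one scan, then filter its occurrences.
def menor_e_resto_alt (lista : List Int) (minimum : Option Int) : Option Int × List Int :=
  match lista with
  | [] => (none, [])
  | h :: t =>
    let lm := t.foldl min h      -- min(lista)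
    let m := match minimum with
      | none => lm
      | some k => min k lm
    (some m, lista.filter (fun x => decide (x ≠ m)))

-- ===== PRECONDITION & SPEC =====
def Spec_menor_e_resto (lista : List Int) (minimum : Option Int) (out : Option Int × List Int) : Prop := out = menor_e_resto_alt lista minimum
instance (lista : List Int) (minimum : Option Int) (out : Option Int × List Int) : Decidable (Spec_menor_e_resto lista minimum out) := by unfold Spec_menor_e_resto; infer_instance

-- ===== CLAIM (what is proved, stated in full; the proofs are below) =====
def Claim_equal_menor_e_resto : Prop := ∀ (lista : List Int) (minimum : Option Int), Dom_menor_e_resto lista minimum → Spec_menor_e_resto lista minimum (menor_e_resto lista minimum)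

-- ===== LEMMAS AND PROOFS =====

-- ===== VERDICT (by name: the statement is the Claim_ definition above) =====
theorem foldl_min_min (s : List Int) (x y : Int) : s.foldl min (min x y) = min x (s.foldl min y) := by
  induction s generalizing y with
  | nil => rfl
  | cons c s ih =>
    simp only [List.foldl_cons, min_assoc, ih]

theorem foldl_min_le_init (s : List Int) (a : Int) : s.foldl min a ≤ a := by
  induction s generalizing a with
  | nil => exact le_refl a
  | cons c s ih => exact le_trans (ih (min a c)) (min_le_left _ _)

theorem foldl_min_le (s : List Int) (a x : Int) (hx : x ∈ a :: s) : s.foldl min a ≤ x := by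
  induction s generalizing a with
  | nil => simp at hx; simp [hx]
  | cons c s ih =>
    simp only [List.foldl_cons]
    rcases List.mem_cons.1 hx with rfl | hx'
    · exact le_trans (foldl_min_le_init s (min x c)) (min_le_left _ _)
    · rcases List.mem_cons.1 hx' with rfl | hx''
      · exact le_trans (foldl_min_le_init s (min a x)) (min_le_right _ _)
      · exact ih (min a c) (List.mem_cons_of_mem _ hx'')

theorem menor_main (t : List Int) (h m : Int) :
    menor_e_resto (h :: t) (some m) =
      (some (min m (t.foldl min h)),
        (h :: t).filter (fun x => decide (x ≠ min m (t.foldl min h)))) := by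
  induction t generalizing h m with
  | nil =>
    simp only [menor_e_resto, List.foldl_nil, List.filter]
    rcases lt_trichotomy h m with hlt | heq | hgt
    · have h1 : ¬ h > m := not_lt.2 (le_of_lt hlt)
      have h2 : ¬ h = m := ne_of_lt hlt
      simp [h1, h2, min_eq_right (le_of_lt hlt)]
    · subst heq
      simp
    · simp [hgt, min_eq_left (le_of_lt hgt), (ne_of_gt hgt)]
  | cons a s ih =>
    have key : menor_e_resto (h :: a :: s) (some m) =
        (let r := menor_e_resto (a :: s) (some m)
         let mu := match r.1 with
           | some rm => if rm < m then rm else m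
           | none => m
         if h > mu then (some mu, h :: r.2) else if h = mu then (some mu, r.2)
         else (some h, a :: s)) := by
      simp only [menor_e_resto]
    rw [key, ih]
    have hK : min m ((a :: s).foldl min h) = min h (min m (s.foldl min a)) := by
      simp only [List.foldl_cons, foldl_min_min]
      rw [min_comm m (min h _), min_assoc, min_comm (s.foldl min a) m, ← min_assoc]
    rw [hK]
    have hmu : (if min m (s.foldl min a) < m then min m (s.foldl min a) else m)
        = min m (s.foldl min a) := by
      by_cases hc : min m (s.foldl min a) < m
      · simp [hc]
      · simp only [if_neg hc]
        exact (le_antisymm (min_le_left _ _) (not_lt.1 hc)).symm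
    simp only [hmu]
    rcases lt_trichotomy h (min m (s.foldl min a)) with hlt | heq | hgt
    · have h1 : ¬ h > min m (s.foldl min a) := not_lt.2 hlt.le
      have hfilter : (a :: s).filter (fun x => decide (x ≠ h)) = a :: s := by
        apply List.filter_eq_self.2
        intro x hx
        have hMx : s.foldl min a ≤ x := foldl_min_le s a x hx
        have : h < x := lt_of_lt_of_le (lt_of_lt_of_le hlt (min_le_right _ _)) hMx
        simp [ne_of_gt this]
      rw [if_neg h1, if_neg (ne_of_lt hlt), min_eq_left hlt.le]
      have hdrop : (h :: a :: s).filter (fun x => decide (x ≠ h))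
          = (a :: s).filter (fun x => decide (x ≠ h)) := by simp [List.filter_cons]
      rw [hdrop, hfilter]
    · subst heq
      simp [List.filter_cons]
    · rw [if_pos hgt, min_eq_right hgt.le]
      simp [List.filter_cons, ne_of_gt hgt]

theorem menor_none (h : Int) (t : List Int) :
    menor_e_resto (h :: t) none = menor_e_resto (h :: t) (some h) := by
  simp only [menor_e_resto]

theorem menor_e_resto_spec : Claim_equal_menor_e_resto := by
  intro lista minimum _
  unfold Spec_menor_e_resto
  match lista, minimum with
  | [], _ => rfl
  | h :: t, some m =>
    rw [menor_main]
    simp only [menor_e_resto_alt]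
  | h :: t, none =>
    rw [menor_none, menor_main]
    have hle : t.foldl min h ≤ h := foldl_min_le t h h (List.mem_cons_self)
    simp only [menor_e_resto_alt, min_eq_right hle]
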